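-- pv_equiv track=rewrite | github.com/bbronek/university | semester6/sheduling/lab2/task2.py | find_available_task
-- ===== SOURCE A (Python) =====
-- def flatten(l):
--     return [item for sublist in l for item in sublist]
--
-- def find_available_task(order_dict, done_tasks, n):
--     chosen_one = -1
--     blockers = flatten(list(order_dict.values()))
--
--     for i in range(1, n + 1):
--         if not (i in blockers) and not (i in done_tasks):
--             chosen_one = i
--             break
--
--     return chosen_one
-- ===== SOURCE B (Python) =====
-- def find_available_task(order_dict, done_tasks, n):
--     unavailable = {b for bs in order_dict.values() for b in bs} | set(done_tasks)
--     # pigeonhole: among 1 .. len(unavailable)+1 some task is free, so no need to range further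
--     m = min(n, len(unavailable) + 1)
--     available = set(range(1, m + 1)) - unavailable
--     return min(available) if available else -1
-- ===== Notes on version B (the rewrite author's own statement) =====
-- stated objective: alternative
-- what changed: Replaces A's ordered scan-with-break over range(1, n+1) with repeated list-membership tests by building the complement set (a range capped at min(n, len(unavailable)+1) by pigeonhole, minus the union of blockers and done tasks) in one set-difference expression and returning its minimum, with no explicit search loop.
import Mathlib
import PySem

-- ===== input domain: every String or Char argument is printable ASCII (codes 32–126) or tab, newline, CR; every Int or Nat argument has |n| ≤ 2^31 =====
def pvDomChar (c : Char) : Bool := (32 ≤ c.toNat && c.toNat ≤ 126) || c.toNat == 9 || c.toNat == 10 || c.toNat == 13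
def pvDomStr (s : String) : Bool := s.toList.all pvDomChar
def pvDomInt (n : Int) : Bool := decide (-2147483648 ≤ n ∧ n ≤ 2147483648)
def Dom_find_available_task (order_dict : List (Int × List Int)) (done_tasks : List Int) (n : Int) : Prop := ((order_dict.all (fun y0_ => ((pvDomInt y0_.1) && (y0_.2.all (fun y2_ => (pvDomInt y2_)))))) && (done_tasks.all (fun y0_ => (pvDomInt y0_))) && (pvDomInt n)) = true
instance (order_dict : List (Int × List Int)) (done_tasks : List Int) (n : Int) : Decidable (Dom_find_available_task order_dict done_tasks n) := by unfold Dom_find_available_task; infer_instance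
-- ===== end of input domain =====

-- B replaces A's ordered scan-with-break over range(1, n+1) by building the complement
-- set (range minus blockers-and-done) with one set difference and taking its minimum.

-- ===== PORT A =====
-- flatten(l) = [item for sublist in l for item in sublist]
def pvFlatten (l : List (List Int)) : List Int := l.flatMap (fun sublist => sublist)

-- 'for i in range(1, n+1): if …: chosen_one = i; break' as a counter loop carrying chosen_one
def pvLoopA (blockers done_tasks : List Int) (n : Int) (i chosen_one : Int) : Int :=
  if i ≤ n then
    if !(blockers.contains i) && !(done_tasks.contains i) then i
    else pvLoopA blockers done_tasks n (i + 1) chosen_one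
  else chosen_one
termination_by (n + 1 - i).toNat
decreasing_by omega

def find_available_task (order_dict : List (Int × List Int)) (done_tasks : List Int) (n : Int) : Int :=
  let chosen_one : Int := -1
  let blockers := pvFlatten (order_dict.map Prod.snd)   -- list(order_dict.values())
  pvLoopA blockers done_tasks n 1 chosen_one

-- ===== PORT B =====
-- unavailable = {b for bs in order_dict.values() for b in bs} | set(done_tasks)
-- m = min(n, len(unavailable)+1)  (pigeonhole cap: some task in 1..len+1 is free)
-- available = set(range(1, m+1)) - unavailable; min(available) if available else -1
-- (min? is 'some' exactly on a non-empty list, which the guard ensures)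
def find_available_task_alt (order_dict : List (Int × List Int)) (done_tasks : List Int) (n : Int) : Int :=
  let unavailable : PySem.Set Int :=
    PySem.Set.union (PySem.Set.ofList ((order_dict.map Prod.snd).flatMap (fun bs => bs)))
      (PySem.Set.ofList done_tasks)
  let m : Int := min n ((unavailable.length : Int) + 1)
  let available : PySem.Set Int :=
    PySem.Set.diff (PySem.Set.ofList (PySem.List.pyRange 1 (m + 1) 1)) unavailable
  if available.isEmpty then -1
  else (PySem.List.min? available (fun x => x)).getD (-1)

-- ===== PRECONDITION & SPEC =====
def Spec_find_available_task (order_dict : List (Int × List Int)) (done_tasks : List Int) (n : Int) (out : Int) : Prop := out = find_available_task_alt order_dict done_tasks n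
instance (order_dict : List (Int × List Int)) (done_tasks : List Int) (n : Int) (out : Int) : Decidable (Spec_find_available_task order_dict done_tasks n out) := by unfold Spec_find_available_task; infer_instance

-- ===== CLAIM =====
def Claim_equal_find_available_task : Prop := ∀ (order_dict : List (Int × List Int)) (done_tasks : List Int) (n : Int), Dom_find_available_task order_dict done_tasks n → Spec_find_available_task order_dict done_tasks n (find_available_task order_dict done_tasks n)

-- ===== LEMMAS AND PROOFS =====

-- A's loop returns the carried default when no i in [i0, n] passes the test
theorem pvLoopA_none (b d : List Int) (n : Int) :
    ∀ (k : Nat) (i c : Int), (n + 1 - i).toNat = k →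
      (∀ j : Int, i ≤ j → j ≤ n → (!(b.contains j) && !(d.contains j)) = false) →
      pvLoopA b d n i c = c := by
  intro k
  induction k with
  | zero =>
      intro i c hk _
      rw [pvLoopA, if_neg (by omega)]
  | succ k ih =>
      intro i c hk hall
      have hin : i ≤ n := by omega
      rw [pvLoopA, if_pos hin, hall i le_rfl hin]
      simp only [Bool.false_eq_true, if_false]
      exact ih (i + 1) c (by omega) (fun j hj hjn => hall j (by omega) hjn)

-- A's loop returns m when m is the first integer ≥ i0 passing the test and m ≤ n
theorem pvLoopA_first (b d : List Int) (n m : Int)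
    (hmn : m ≤ n) (hpm : (!(b.contains m) && !(d.contains m)) = true)
    (hmin : ∀ j : Int, 1 ≤ j → j < m → (!(b.contains j) && !(d.contains j)) = false) :
    ∀ (k : Nat) (i c : Int), 1 ≤ i → i ≤ m → (m - i).toNat = k →
      pvLoopA b d n i c = m := by
  intro k
  induction k with
  | zero =>
      intro i c _ him hk
      have : i = m := by omega
      subst this
      rw [pvLoopA, if_pos hmn, hpm, if_pos rfl]
  | succ k ih =>
      intro i c hi him hk
      have hiltm : i < m := by omega
      rw [pvLoopA, if_pos (by omega), hmin i hi hiltm]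
      simp only [Bool.false_eq_true, if_false]
      exact ih (i + 1) c (by omega) (by omega) (by omega)

-- pigeonhole: among 1, 2, ..., len(bad)+1 some integer is outside the list bad
theorem exists_free_int (bad : List Int) :
    ∃ j : Int, 1 ≤ j ∧ j ≤ (bad.length : Int) + 1 ∧ j ∉ bad := by
  by_contra hall
  push Not at hall
  have hin : ∀ k : Nat, k < bad.length + 1 → ((1 : Int) + k) ∈ bad := by
    intro k hk
    exact hall (1 + k) (by omega) (by omega)
  have hinj : Function.Injective (fun k : Nat => (1 : Int) + (k : Int)) := by
    intro a b h
    simp only at h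
    omega
  have hsub : (Finset.range (bad.length + 1)).image (fun k : Nat => (1 : Int) + (k : Int)) ⊆ bad.toFinset := by
    intro x hx
    simp only [Finset.mem_image, Finset.mem_range] at hx
    obtain ⟨k, hk, rfl⟩ := hx
    exact List.mem_toFinset.mpr (hin k hk)
  have hcard1 : ((Finset.range (bad.length + 1)).image (fun k : Nat => (1 : Int) + (k : Int))).card
      = bad.length + 1 := by
    rw [Finset.card_image_of_injective _ hinj, Finset.card_range]
  have hcard2 := Finset.card_le_card hsub
  have hcard3 : bad.toFinset.card ≤ bad.length := List.toFinset_card_le bad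
  omega

theorem find_available_task_spec : Claim_equal_find_available_task := by
  intro order_dict done_tasks n _
  unfold Spec_find_available_task find_available_task find_available_task_alt
  simp only []
  set unav : PySem.Set Int :=
    PySem.Set.union (PySem.Set.ofList ((order_dict.map Prod.snd).flatMap (fun bs => bs)))
      (PySem.Set.ofList done_tasks) with hunav
  set cap : Int := min n ((unav.length : Int) + 1) with hcap
  set avail : PySem.Set Int :=
    PySem.Set.diff (PySem.Set.ofList (PySem.List.pyRange 1 (cap + 1) 1)) unav with havail
  have hp : ∀ j : Int,
      ((!((pvFlatten (order_dict.map Prod.snd)).contains j) && !(done_tasks.contains j)) = true)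
        ↔ j ∉ unav := by
    intro j
    rw [hunav]
    simp [pvFlatten, PySem.Set.mem_union, PySem.Set.mem_ofList]
  have hmemA : ∀ x : Int, x ∈ avail ↔ (1 ≤ x ∧ x ≤ cap) ∧ x ∉ unav := by
    intro x
    rw [havail, PySem.Set.mem_diff, PySem.Set.mem_ofList, PySem.List.mem_pyRange_one]
    constructor
    · rintro ⟨⟨h1, h2⟩, h3⟩; exact ⟨⟨h1, by omega⟩, h3⟩
    · rintro ⟨⟨h1, h2⟩, h3⟩; exact ⟨⟨h1, by omega⟩, h3⟩
  have hcapn : cap ≤ n := min_le_left _ _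
  by_cases hA : avail = []
  · -- avail empty: the cap must equal n (else pigeonhole finds a free j ≤ len+1),
    -- and then no i in 1..n passes A's test either
    have hcapeq : cap = n := by
      rcases Int.lt_or_le ((unav.length : Int) + 1) n with hlt | hle
      swap
      · rw [hcap]; omega
      · exfalso
        obtain ⟨j, h1j, hjlen, hjun⟩ := exists_free_int unav
        have : j ∈ avail := (hmemA j).mpr ⟨⟨h1j, by rw [hcap]; omega⟩, hjun⟩
        rw [hA] at this
        exact List.not_mem_nil this
    rw [hA]
    simp only [List.isEmpty_nil, if_true]
    apply pvLoopA_none _ _ _ ((n + 1 - 1).toNat) 1 (-1) rfl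
    intro j hj hjn
    by_contra hcon
    have hpt : (!((pvFlatten (order_dict.map Prod.snd)).contains j) && !(done_tasks.contains j)) = true := by
      cases h : (!((pvFlatten (order_dict.map Prod.snd)).contains j) && !(done_tasks.contains j))
      · exact absurd h hcon
      · rfl
    have : j ∈ avail := (hmemA j).mpr ⟨⟨hj, by omega⟩, (hp j).mp hpt⟩
    rw [hA] at this
    exact List.not_mem_nil this
  · have hne : avail.isEmpty = false := by
      cases h : avail.isEmpty
      · rfl
      · exact absurd (List.isEmpty_iff.mp h) hA
    rw [hne]
    simp only [Bool.false_eq_true, if_false]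
    obtain ⟨m, hm⟩ : ∃ m, PySem.List.min? avail (fun x => x) = some m := by
      cases h : PySem.List.min? avail (fun x => x)
      · exact absurd ((PySem.List.min?_eq_none_iff _ _).mp h) hA
      · exact ⟨_, rfl⟩
    have hmmem : m ∈ avail := PySem.List.min?_mem hm
    have hmmin : ∀ y ∈ avail, m ≤ y := fun y hy => PySem.List.min?_isMin hm y hy
    obtain ⟨⟨h1m, hmcap⟩, hmun⟩ := (hmemA m).mp hmmem
    rw [hm, Option.getD_some]
    apply pvLoopA_first _ _ _ _ (le_trans hmcap hcapn) ((hp m).mpr hmun) _ ((m - 1).toNat) 1 (-1) le_rfl h1m rfl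
    intro j h1j hjm
    cases h : (!((pvFlatten (order_dict.map Prod.snd)).contains j) && !(done_tasks.contains j))
    · rfl
    · exfalso
      have : j ∈ avail := (hmemA j).mpr ⟨⟨h1j, by omega⟩, (hp j).mp h⟩
      have := hmmin j this
      omega
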